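-- pv_equiv track=rewrite | github.com/ArshiyaNasirin/AIML-One-Credit | hackathon-project/safeguard_ai.py | analyze_text_messages
-- ===== SOURCE A (Python) =====
-- def analyze_text_messages(messages):
--     """Cybersecurity: Analyze messages for stalking/harassment patterns"""
--     threat_indicators = ["follow", "watching", "alone", "threat", "hurt", "kill"]
--     threat_score = 0
--
--     for msg in messages:
--         msg_lower = msg.lower()
--         for indicator in threat_indicators:
--             if indicator in msg_lower:
--                 threat_score += 15
--
--         if messages.count(msg) > 3:
--             threat_score += 20
--
--     return min(threat_score, 100)
-- ===== SOURCE B (Python) =====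
-- def analyze_text_messages(messages):
--     """Cybersecurity: Analyze messages for stalking/harassment patterns"""
--     threat_indicators = ["follow", "watching", "alone", "threat", "hurt", "kill"]
--     counts = {}
--     for msg in messages:
--         counts[msg] = counts.get(msg, 0) + 1
--     threat_score = 0
--     for msg, c in counts.items():
--         hits = sum(1 for ind in threat_indicators if ind in msg.lower())
--         threat_score += 15 * hits * c
--         if c > 3:
--             threat_score += 20 * c
--     return min(threat_score, 100)
-- ===== Notes on version B (the rewrite author's own statement) =====
-- stated objective: faster
-- what changed: B counts occurrences once into a dict and then loops over distinct messages weighted by multiplicity (15*hits*c, plus 20*c once when c>3), removing A's inner messages.count scan per message.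
import Mathlib
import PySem

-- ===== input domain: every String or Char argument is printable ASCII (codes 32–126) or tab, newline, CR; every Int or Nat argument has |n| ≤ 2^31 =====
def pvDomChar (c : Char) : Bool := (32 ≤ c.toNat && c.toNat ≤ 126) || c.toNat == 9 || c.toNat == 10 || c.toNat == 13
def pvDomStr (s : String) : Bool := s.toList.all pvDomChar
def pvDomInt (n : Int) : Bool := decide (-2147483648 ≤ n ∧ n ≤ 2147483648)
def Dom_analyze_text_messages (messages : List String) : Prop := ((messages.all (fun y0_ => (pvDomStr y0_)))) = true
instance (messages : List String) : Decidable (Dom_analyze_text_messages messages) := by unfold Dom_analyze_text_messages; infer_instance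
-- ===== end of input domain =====

-- B replaces A's per-message messages.count inner scan by one counting pass over a dict and a loop
-- over distinct messages weighted by multiplicity (objective: faster).


-- ===== PORT A =====
def pvIndicators : List String := ["follow", "watching", "alone", "threat", "hurt", "kill"]

def analyze_text_messages (messages : List String) : Int :=
  let threat_score : Int :=
    messages.foldl (fun score msg =>
      let msg_lower := PySem.Str.lower msg
      let score :=
        pvIndicators.foldl (fun s indicator =>
          if PySem.Str.isIn indicator msg_lower then s + 15 else s) score
      if 3 < PySem.List.count messages msg then score + 20 else score) 0
  min threat_score 100

-- ===== PORT B =====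
def analyze_text_messages_alt (messages : List String) : Int :=
  -- counts = {}; for msg in messages: counts[msg] = counts.get(msg, 0) + 1
  let counts : PySem.Dict String Int :=
    messages.foldl (fun d msg => d.insert msg (d.getD msg 0 + 1)) PySem.Dict.empty
  let threat_score : Int :=
    counts.items.foldl (fun score p =>
      let msg := p.1
      let c := p.2
      let hits : Int :=
        ((pvIndicators.filter (fun ind => PySem.Str.isIn ind (PySem.Str.lower msg))).length : Int)
      let score := score + 15 * hits * c
      if 3 < c then score + 20 * c else score) 0
  min threat_score 100

-- ===== PRECONDITION & SPEC =====
def Spec_analyze_text_messages (messages : List String) (out : Int) : Prop := out = analyze_text_messages_alt messages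
instance (messages : List String) (out : Int) : Decidable (Spec_analyze_text_messages messages out) := by unfold Spec_analyze_text_messages; infer_instance

-- ===== CLAIM (what is proved, stated in full; the proofs are below) =====
def Claim_equal_analyze_text_messages : Prop := ∀ (messages : List String), Dom_analyze_text_messages messages → Spec_analyze_text_messages messages (analyze_text_messages messages)

-- ===== LEMMAS AND PROOFS =====

-- per-message keyword score (15 per matched indicator)
def pvKw (msg : String) : Int :=
  15 * ((pvIndicators.filter (fun ind => PySem.Str.isIn ind (PySem.Str.lower msg))).length : Int)

-- per-occurrence contribution of one message in A's loop
def pvF (messages : List String) (msg : String) : Int :=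
  pvKw msg + (if 3 < PySem.List.count messages msg then 20 else 0)

-- A's inner indicator loop adds exactly pvKw msg
lemma pvInnerA (s : Int) (msg : String) :
    pvIndicators.foldl (fun s indicator =>
      if PySem.Str.isIn indicator (PySem.Str.lower msg) then s + 15 else s) s = s + pvKw msg := by
  simp only [pvIndicators, pvKw, List.foldl, List.filter]
  cases PySem.Str.isIn "follow" (PySem.Str.lower msg) <;>
    cases PySem.Str.isIn "watching" (PySem.Str.lower msg) <;>
    cases PySem.Str.isIn "alone" (PySem.Str.lower msg) <;>
    cases PySem.Str.isIn "threat" (PySem.Str.lower msg) <;>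
    cases PySem.Str.isIn "hurt" (PySem.Str.lower msg) <;>
    cases PySem.Str.isIn "kill" (PySem.Str.lower msg) <;> simp <;> ring

-- A's whole loop is the sum of pvF over all occurrences
lemma pvA_sum (messages : List String) :
    messages.foldl (fun score msg =>
      let msg_lower := PySem.Str.lower msg
      let score :=
        pvIndicators.foldl (fun s indicator =>
          if PySem.Str.isIn indicator msg_lower then s + 15 else s) score
      if 3 < PySem.List.count messages msg then score + 20 else score) 0
      = (messages.map (pvF messages)).sum := by
  have h : ∀ (l : List String) (init : Int),
      l.foldl (fun score msg =>
        let msg_lower := PySem.Str.lower msg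
        let score :=
          pvIndicators.foldl (fun s indicator =>
            if PySem.Str.isIn indicator msg_lower then s + 15 else s) score
        if 3 < PySem.List.count messages msg then score + 20 else score) init
        = init + (l.map (pvF messages)).sum := by
    intro l
    induction l with
    | nil => intro init; simp
    | cons x xs ih =>
      intro init
      simp only [List.foldl_cons]
      rw [ih]
      simp only [pvInnerA, List.map_cons, List.sum_cons]
      unfold pvF
      split_ifs <;> ring
  simpa using h messages 0

-- the per-key body of B's loop, as a function of the key and its count
def pvG (messages : List String) (k : String) : Int :=
  (PySem.List.count messages k : Int) * pvF messages k

-- B's loop over the counter items is the sum of pvG over the distinct messages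
lemma pvB_sum (messages : List String) :
    ((messages.foldl (fun d msg => d.insert msg (d.getD msg 0 + 1))
        (PySem.Dict.empty : PySem.Dict String Int)).items).foldl (fun score p =>
      let msg := p.1
      let c := p.2
      let hits : Int :=
        ((pvIndicators.filter (fun ind => PySem.Str.isIn ind (PySem.Str.lower msg))).length : Int)
      let score := score + 15 * hits * c
      if 3 < c then score + 20 * c else score) 0
      = ((PySem.Set.ofList messages).map (pvG messages)).sum := by
  rw [PySem.Dict.foldl_insert_getD_add_one_eq_counter, PySem.Dict.items_counter]
  rw [List.foldl_map]
  have h : ∀ (l : List String) (init : Int),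
      l.foldl (fun score k =>
        (fun score (p : String × Int) =>
          let msg := p.1
          let c := p.2
          let hits : Int :=
            ((pvIndicators.filter (fun ind => PySem.Str.isIn ind (PySem.Str.lower msg))).length : Int)
          let score := score + 15 * hits * c
          if 3 < c then score + 20 * c else score) score (k, (messages.count k : Int))) init
        = init + (l.map (pvG messages)).sum := by
    intro l
    induction l with
    | nil => intro init; simp
    | cons x xs ih =>
      intro init
      simp only [List.foldl_cons]
      rw [ih]
      simp only [List.map_cons, List.sum_cons]
      unfold pvG pvF pvKw PySem.List.count
      simp only [show ∀ n : Nat, ((3:Int) < (n:Int)) ↔ 3 < n from fun n => by exact_mod_cast Iff.rfl]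
      split_ifs <;> ring
  simpa using h (PySem.Set.ofList messages) 0

-- sum over occurrences = sum over distinct elements weighted by multiplicity
lemma pvSum_count (messages : List String) (f : String → Int) :
    (messages.map f).sum
      = ((PySem.Set.ofList messages).map (fun k => (messages.count k : Int) * f k)).sum := by
  rw [Finset.sum_list_map_count]
  have hnd := PySem.Set.nodup_ofList messages
  rw [← List.sum_toFinset _ hnd]
  have hfs : (PySem.Set.ofList messages).toFinset = messages.toFinset := by
    apply Finset.ext
    intro a
    simp [List.mem_toFinset, PySem.Set.mem_ofList]
  rw [hfs]
  apply Finset.sum_congr rfl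
  intro x _
  simp

-- ===== VERDICT (by name: the statement is the Claim_ definition above) =====
theorem analyze_text_messages_spec : Claim_equal_analyze_text_messages := by
  intro messages _
  unfold Spec_analyze_text_messages analyze_text_messages analyze_text_messages_alt
  simp only [pvA_sum, pvB_sum, pvSum_count messages (pvF messages)]
  rfl
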